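-- pv_equiv track=rewrite | github.com/S1ngularD2ality/eidonic-language-elol | 101-200_perception_& _environmental_awareness/glyph_104.py | glyph_104
-- ===== SOURCE A (Python) =====
-- def glyph_104(matrix):
--     """
--     Sums each quadrant and returns a 2x2 summary matrix.
--     """
--     n = len(matrix)
--     half = n // 2
--     q1 = sum(sum(row[:half]) for row in matrix[:half])
--     q2 = sum(sum(row[half:]) for row in matrix[:half])
--     q3 = sum(sum(row[:half]) for row in matrix[half:])
--     q4 = sum(sum(row[half:]) for row in matrix[half:])
--     return [[q1, q2], [q3, q4]]
-- ===== SOURCE B (Python) =====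
-- def glyph_104(matrix):
--     """
--     Sums each quadrant and returns a 2x2 summary matrix.
--     B: one row-major pass with enumerate, routing each element into a 2x2
--     accumulator grid instead of four sliced double-sum passes.
--     """
--     half = len(matrix) // 2
--     res = [[0, 0], [0, 0]]
--     for i, row in enumerate(matrix):
--         for j, val in enumerate(row):
--             res[0 if i < half else 1][0 if j < half else 1] += val
--     return res
-- ===== Notes on version B (the rewrite author's own statement) =====
-- stated objective: simpler
-- what changed: Replaces four separate slice-and-double-sum passes with a single row-major enumerate pass that routes each element into a 2x2 accumulator grid.
import Mathlib
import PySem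

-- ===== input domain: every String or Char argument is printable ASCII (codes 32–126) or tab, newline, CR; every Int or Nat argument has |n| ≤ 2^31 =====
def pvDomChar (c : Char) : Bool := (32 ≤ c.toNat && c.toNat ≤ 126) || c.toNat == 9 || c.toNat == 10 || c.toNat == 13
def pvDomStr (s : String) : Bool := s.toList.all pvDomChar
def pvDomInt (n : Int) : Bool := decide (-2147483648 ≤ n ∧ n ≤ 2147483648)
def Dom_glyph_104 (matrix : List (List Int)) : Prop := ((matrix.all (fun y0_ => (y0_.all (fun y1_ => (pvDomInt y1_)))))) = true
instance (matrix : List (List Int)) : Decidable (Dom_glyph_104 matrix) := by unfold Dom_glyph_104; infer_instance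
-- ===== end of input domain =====

-- B replaces A's four slice-and-double-sum passes by one row-major pass routing
-- each element into a 2x2 accumulator (objective: simpler).

-- ===== PORT A =====
def glyph_104 (matrix : List (List Int)) : List (List Int) :=
  let n : Int := matrix.length
  let half : Int := PySem.Int.floordiv n 2
  let q1 := ((PySem.List.slice matrix none (some half)).map
      (fun row => (PySem.List.slice row none (some half)).sum)).sum
  let q2 := ((PySem.List.slice matrix none (some half)).map
      (fun row => (PySem.List.slice row (some half) none).sum)).sum
  let q3 := ((PySem.List.slice matrix (some half) none).map
      (fun row => (PySem.List.slice row none (some half)).sum)).sum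
  let q4 := ((PySem.List.slice matrix (some half) none).map
      (fun row => (PySem.List.slice row (some half) none).sum)).sum
  [[q1, q2], [q3, q4]]

-- ===== PORT B =====
def glyph_104_alt (matrix : List (List Int)) : List (List Int) :=
  let half : Int := PySem.Int.floordiv matrix.length 2
  let res : Int × Int × Int × Int :=
    (PySem.List.enumerate matrix).foldl (fun st p =>
      (PySem.List.enumerate p.2).foldl (fun st2 q =>
        if p.1 < half then
          if q.1 < half then (st2.1 + q.2, st2.2.1, st2.2.2.1, st2.2.2.2)
          else (st2.1, st2.2.1 + q.2, st2.2.2.1, st2.2.2.2)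
        else
          if q.1 < half then (st2.1, st2.2.1, st2.2.2.1 + q.2, st2.2.2.2)
          else (st2.1, st2.2.1, st2.2.2.1, st2.2.2.2 + q.2)) st)
      ((0 : Int), (0 : Int), (0 : Int), (0 : Int))
  [[res.1, res.2.1], [res.2.2.1, res.2.2.2]]

-- ===== PRECONDITION & SPEC =====
def Spec_glyph_104 (matrix : List (List Int)) (out : List (List Int)) : Prop := out = glyph_104_alt matrix
instance (matrix : List (List Int)) (out : List (List Int)) : Decidable (Spec_glyph_104 matrix out) := by unfold Spec_glyph_104; infer_instance

-- ===== CLAIM (what is proved, stated in full; the proofs are below) =====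
def Claim_equal_glyph_104 : Prop := ∀ (matrix : List (List Int)), Dom_glyph_104 matrix → Spec_glyph_104 matrix (glyph_104 matrix)

-- ===== LEMMAS AND PROOFS =====

-- inner loop of B over one row: elements with index < h go to the first slot,
-- the rest to the second
theorem pv_inner_lemma (h : Nat) (row : List Int) (s : Nat) (a b : Int)
    (f : Int × Int → Int × Int → Int × Int)
    (hf : ∀ ab q, f ab q = if q.1 < (h : Int) then (ab.1 + q.2, ab.2) else (ab.1, ab.2 + q.2)) :
    (PySem.List.enumerate row (s : Int)).foldl f (a, b)
      = (a + (row.take (h - s)).sum, b + (row.drop (h - s)).sum) := by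
  induction row generalizing s a b with
  | nil => simp
  | cons v row ih =>
    rw [PySem.List.enumerate_cons]
    simp only [List.foldl_cons, hf]
    by_cases hs : s < h
    · have h1 : ((s : Int) < (h : Int)) := by exact_mod_cast hs
      have h2 : h - s = (h - (s + 1)) + 1 := by omega
      have h3 : ((s : Int) + 1) = ((s + 1 : Nat) : Int) := by push_cast; ring
      rw [if_pos h1, h3, ih]
      rw [h2, List.take_succ_cons, List.drop_succ_cons, List.sum_cons]
      ring_nf
    · have h1 : ¬ ((s : Int) < (h : Int)) := by exact_mod_cast hs
      have h2 : h - s = 0 := by omega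
      have h4 : h - (s + 1) = 0 := by omega
      have h3 : ((s : Int) + 1) = ((s + 1 : Nat) : Int) := by push_cast; ring
      rw [if_neg h1, h3, ih]
      rw [h2, h4]
      simp
      ring

-- outer loop of B: rows with index < h accumulate into the first pair,
-- the rest into the second
theorem pv_outer_lemma (h : Nat) (rows : List (List Int)) (s : Nat) (a b c d : Int) :
    (PySem.List.enumerate rows (s : Int)).foldl (fun st p =>
      (PySem.List.enumerate p.2).foldl (fun st2 q =>
        if p.1 < (h : Int) then
          if q.1 < (h : Int) then (st2.1 + q.2, st2.2.1, st2.2.2.1, st2.2.2.2)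
          else (st2.1, st2.2.1 + q.2, st2.2.2.1, st2.2.2.2)
        else
          if q.1 < (h : Int) then (st2.1, st2.2.1, st2.2.2.1 + q.2, st2.2.2.2)
          else (st2.1, st2.2.1, st2.2.2.1, st2.2.2.2 + q.2)) st) (a, b, c, d)
      = (a + ((rows.take (h - s)).map (fun r => (r.take h).sum)).sum,
         b + ((rows.take (h - s)).map (fun r => (r.drop h).sum)).sum,
         c + ((rows.drop (h - s)).map (fun r => (r.take h).sum)).sum,
         d + ((rows.drop (h - s)).map (fun r => (r.drop h).sum)).sum) := by
  induction rows generalizing s a b c d with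
  | nil => simp
  | cons row rows ih =>
    rw [PySem.List.enumerate_cons]
    simp only [List.foldl_cons]
    have h3 : ((s : Int) + 1) = ((s + 1 : Nat) : Int) := by push_cast; ring
    by_cases hs : s < h
    · have h1 : ((s : Int) < (h : Int)) := by exact_mod_cast hs
      simp only [h1, if_true]
      -- the inner fold updates only the first two slots
      have hinner : ∀ (a b c d : Int),
          (PySem.List.enumerate row (0 : Int)).foldl (fun st2 q =>
            if q.1 < (h : Int) then (st2.1 + q.2, st2.2.1, st2.2.2.1, st2.2.2.2)
            else (st2.1, st2.2.1 + q.2, st2.2.2.1, st2.2.2.2)) (a, b, c, d)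
            = (a + (row.take h).sum, b + (row.drop h).sum, c, d) := by
        intro a b c d
        have := pv_inner_lemma h row 0 a b
          (fun ab q => if q.1 < (h : Int) then (ab.1 + q.2, ab.2) else (ab.1, ab.2 + q.2))
          (fun ab q => rfl)
        -- transport the pair-valued fold to the 4-tuple fold with fixed c, d
        have key : ∀ (l : List (Int × Int)) (a b : Int),
            l.foldl (fun st2 q =>
              if q.1 < (h : Int) then (st2.1 + q.2, st2.2.1, st2.2.2.1, st2.2.2.2)
              else (st2.1, st2.2.1 + q.2, st2.2.2.1, st2.2.2.2))
              ((a, b, c, d) : Int × Int × Int × Int)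
            = (((l.foldl (fun ab q =>
                if q.1 < (h : Int) then (ab.1 + q.2, ab.2) else (ab.1, ab.2 + q.2)) (a, b)).1,
               (l.foldl (fun ab q =>
                if q.1 < (h : Int) then (ab.1 + q.2, ab.2) else (ab.1, ab.2 + q.2)) (a, b)).2,
               c, d) : Int × Int × Int × Int) := by
          intro l
          induction l with
          | nil => intro a b; rfl
          | cons q l ihl =>
            intro a b
            simp only [List.foldl_cons]
            by_cases hq : q.1 < (h : Int) <;> simp [hq, ihl]
        rw [Nat.cast_zero, Nat.sub_zero] at this
        rw [key, this]
      rw [hinner, h3, ih]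
      have h2 : h - s = (h - (s + 1)) + 1 := by omega
      rw [h2, List.take_succ_cons, List.drop_succ_cons]
      simp only [List.map_cons, List.sum_cons]
      ring_nf
    · have h1 : ¬ ((s : Int) < (h : Int)) := by exact_mod_cast hs
      simp only [h1, if_false]
      have hinner : ∀ (a b c d : Int),
          (PySem.List.enumerate row (0 : Int)).foldl (fun st2 q =>
            if q.1 < (h : Int) then (st2.1, st2.2.1, st2.2.2.1 + q.2, st2.2.2.2)
            else (st2.1, st2.2.1, st2.2.2.1, st2.2.2.2 + q.2)) (a, b, c, d)
            = (a, b, c + (row.take h).sum, d + (row.drop h).sum) := by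
        intro a b c d
        have := pv_inner_lemma h row 0 c d
          (fun ab q => if q.1 < (h : Int) then (ab.1 + q.2, ab.2) else (ab.1, ab.2 + q.2))
          (fun ab q => rfl)
        have key : ∀ (l : List (Int × Int)) (c d : Int),
            l.foldl (fun st2 q =>
              if q.1 < (h : Int) then (st2.1, st2.2.1, st2.2.2.1 + q.2, st2.2.2.2)
              else (st2.1, st2.2.1, st2.2.2.1, st2.2.2.2 + q.2))
              ((a, b, c, d) : Int × Int × Int × Int)
            = ((a, b,
               (l.foldl (fun ab q =>
                if q.1 < (h : Int) then (ab.1 + q.2, ab.2) else (ab.1, ab.2 + q.2)) (c, d)).1,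
               (l.foldl (fun ab q =>
                if q.1 < (h : Int) then (ab.1 + q.2, ab.2) else (ab.1, ab.2 + q.2)) (c, d)).2)
               : Int × Int × Int × Int) := by
          intro l
          induction l with
          | nil => intro c d; rfl
          | cons q l ihl =>
            intro c d
            simp only [List.foldl_cons]
            by_cases hq : q.1 < (h : Int) <;> simp [hq, ihl]
        rw [Nat.cast_zero, Nat.sub_zero] at this
        rw [key, this]
      rw [hinner, h3, ih]
      have h2 : h - s = 0 := by omega
      have h4 : h - (s + 1) = 0 := by omega
      rw [h2, h4]
      simp only [List.take_zero, List.drop_zero, List.map_nil, List.sum_nil,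
        List.map_cons, List.sum_cons]
      ring_nf

-- ===== VERDICT (by name: the statement is the Claim_ definition above) =====
theorem glyph_104_spec : Claim_equal_glyph_104 := by
  intro matrix _
  unfold Spec_glyph_104
  simp only [glyph_104, glyph_104_alt]
  have hh : PySem.Int.floordiv ((matrix.length : Int)) 2 = ((matrix.length / 2 : Nat) : Int) := by
    rw [PySem.Int.floordiv_eq_ediv_of_pos (by norm_num)]
    omega
  rw [hh]
  have this0 := pv_outer_lemma (matrix.length / 2) matrix 0 0 0 0 0
  rw [Nat.cast_zero] at this0
  rw [this0]
  simp only [Nat.sub_zero, zero_add, PySem.List.slice_to_natCast,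
    PySem.List.slice_from_natCast, List.map_take, List.map_drop]
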